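-- pv_equiv track=rewrite | github.com/tgu0/SpotMM | FeaturesEngineering.py | streak_counter
-- ===== SOURCE A (Python) =====
-- def streak_counter(arr):
--     count = 0
--     out = []
--     for x in arr:
--         if x:
--             count += 1
--         else:
--             count = 0
--         out.append(count)
--     return out
-- ===== SOURCE B (Python) =====
-- from itertools import groupby
--
-- def streak_counter(arr):
--     out = []
--     for truthy, grp in groupby(arr, key=bool):
--         n = sum(1 for _ in grp)
--         if truthy:
--             out.extend(range(1, n + 1))
--         else:
--             out.extend([0] * n)
--     return out
-- ===== Notes on version B (the rewrite author's own statement) =====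
-- stated objective: alternative
-- what changed: B groups the input into maximal truthy/falsy runs with itertools.groupby and emits a ramp 1..n per truthy run and n zeros per falsy run, instead of A's element-by-element running counter.
import Mathlib
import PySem

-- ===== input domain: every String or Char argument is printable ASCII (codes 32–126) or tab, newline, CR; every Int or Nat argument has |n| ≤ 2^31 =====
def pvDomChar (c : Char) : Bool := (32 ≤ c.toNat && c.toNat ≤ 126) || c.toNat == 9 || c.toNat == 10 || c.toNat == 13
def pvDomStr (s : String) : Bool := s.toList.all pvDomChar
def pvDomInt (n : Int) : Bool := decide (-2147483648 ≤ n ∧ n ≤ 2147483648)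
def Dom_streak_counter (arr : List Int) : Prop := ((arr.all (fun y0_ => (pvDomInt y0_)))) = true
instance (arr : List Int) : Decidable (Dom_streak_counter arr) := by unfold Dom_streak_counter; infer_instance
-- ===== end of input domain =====

-- B replaces A's per-element running counter by run-length grouping (ramp per truthy run,
-- zero-block per falsy run): a genuinely different decomposition, same O(n) cost.


-- ===== PORT A =====
-- literal port of A: one pass keeping (count, out), appending count each step
def streak_counter (arr : List Int) : List Int :=
  (arr.foldl (fun (s : Int × List Int) x =>
      let count := if x ≠ 0 then s.1 + 1 else 0
      (count, s.2 ++ [count])) (0, [])).2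

-- ===== PORT B =====
-- port of B's groupby loop: peel a maximal run of equal truthiness, emit its block, recurse
def streak_counter_alt (arr : List Int) : List Int :=
  match arr with
  | [] => []
  | x :: xs =>
    if x ≠ 0 then
      let run := (x :: xs).takeWhile (fun y => y ≠ 0)
      ((List.range run.length).map (fun i => (Int.ofNat i) + 1)) ++
        streak_counter_alt ((x :: xs).dropWhile (fun y => y ≠ 0))
    else
      let run := (x :: xs).takeWhile (fun y => y = 0)
      List.replicate run.length 0 ++
        streak_counter_alt ((x :: xs).dropWhile (fun y => y = 0))
termination_by arr.length
decreasing_by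
  · simp only [List.dropWhile]
    have : (decide ¬x = 0) = true := by simpa using (by simpa using ‹x ≠ 0›)
    simp [this]
    exact List.length_dropWhile_le _ _
  · simp only [List.dropWhile]
    have hx : x = 0 := by simpa using ‹¬ x ≠ 0›
    simp [hx]
    exact List.length_dropWhile_le _ _

-- ===== PRECONDITION & SPEC =====
def Spec_streak_counter (arr : List Int) (out : List Int) : Prop := out = streak_counter_alt arr
instance (arr : List Int) (out : List Int) : Decidable (Spec_streak_counter arr out) := by unfold Spec_streak_counter; infer_instance

-- ===== CLAIM (what is proved, stated in full; the proofs are below) =====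
def Claim_equal_streak_counter : Prop := ∀ (arr : List Int), Dom_streak_counter arr → Spec_streak_counter arr (streak_counter arr)

-- ===== LEMMAS AND PROOFS =====

-- common recursive characterisation: the streak list starting from count c
def pvSpecGo (c : Int) : List Int → List Int
  | [] => []
  | x :: xs => if x ≠ 0 then (c + 1) :: pvSpecGo (c + 1) xs else 0 :: pvSpecGo 0 xs

theorem pvA_go (xs : List Int) : ∀ (c : Int) (acc : List Int),
    (xs.foldl (fun (s : Int × List Int) x =>
      let count := if x ≠ 0 then s.1 + 1 else 0
      (count, s.2 ++ [count])) (c, acc)).2 = acc ++ pvSpecGo c xs := by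
  induction xs with
  | nil => intro c acc; simp [pvSpecGo]
  | cons x xs ih =>
    intro c acc
    by_cases hx : x = 0
    · have h := ih 0 (acc ++ [0])
      rw [List.append_assoc, List.singleton_append] at h
      simpa [pvSpecGo, hx] using h
    · have h := ih (c + 1) (acc ++ [c + 1])
      rw [List.append_assoc, List.singleton_append] at h
      simpa [pvSpecGo, hx] using h

theorem pvRamp (run : List Int) : ∀ (rest : List Int) (c : Int), (∀ y ∈ run, y ≠ 0) →
    pvSpecGo c (run ++ rest) =
      (List.map (fun i : Nat => c + (i : Int) + 1) (List.range run.length)) ++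
        pvSpecGo (c + run.length) rest := by
  induction run with
  | nil => intro rest c _; simp
  | cons x xs ih =>
    intro rest c h
    have hx : x ≠ 0 := h x (by simp)
    rw [List.cons_append, pvSpecGo, if_pos hx,
      ih rest (c + 1) (fun y hy => h y (List.mem_cons_of_mem _ hy))]
    simp only [List.length_cons, List.range_succ_eq_map, List.map_cons, List.map_map,
      List.cons_append]
    congr 1
    · ring
    congr 1
    · apply List.map_congr_left; intro i _; simp [Function.comp]; ring
    · congr 1; push_cast; ring

theorem pvZeros (zs : List Int) : ∀ (rest : List Int), (∀ y ∈ zs, y = 0) →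
    pvSpecGo 0 (zs ++ rest) = List.replicate zs.length 0 ++ pvSpecGo 0 rest := by
  induction zs with
  | nil => intro rest _; simp
  | cons x xs ih =>
    intro rest h
    have hx : x = 0 := h x (by simp)
    simp [pvSpecGo, hx, ih rest (fun y hy => h y (by simp [hy])), List.replicate_succ]

theorem pvReset (rest : List Int) (c : Int)
    (h : rest = [] ∨ ∃ t, rest = 0 :: t) : pvSpecGo c rest = pvSpecGo 0 rest := by
  rcases h with h | ⟨t, h⟩ <;> simp [h, pvSpecGo]

theorem pvDrop_shape (p : Int → Bool) (xs : List Int) :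
    xs.dropWhile p = [] ∨ ∃ y t, xs.dropWhile p = y :: t ∧ p y = false := by
  induction xs with
  | nil => left; rfl
  | cons x xs ih =>
    by_cases hx : p x
    · simpa [List.dropWhile, hx] using ih
    · right; exact ⟨x, xs, by simp [List.dropWhile, hx], by simpa using hx⟩

theorem pvAlt_eq_go (n : ℕ) : ∀ (xs : List Int), xs.length ≤ n →
    streak_counter_alt xs = pvSpecGo 0 xs := by
  induction n with
  | zero =>
    intro xs h
    match xs with
    | [] => simp [streak_counter_alt, pvSpecGo]
    | x :: xs => simp at h
  | succ n ih =>
    intro xs hlen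
    match xs with
    | [] => simp [streak_counter_alt, pvSpecGo]
    | x :: xs =>
      by_cases hx : x = 0
      · -- falsy run
        have hxp : ¬ (x ≠ 0) := by simpa using hx
        rw [streak_counter_alt, if_neg hxp]
        set p : Int → Bool := fun y => decide (y = 0) with hp
        have hsplit : (x :: xs).takeWhile p ++ (x :: xs).dropWhile p = x :: xs :=
          List.takeWhile_append_dropWhile
        have hall : ∀ y ∈ (x :: xs).takeWhile p, y = 0 := by
          intro y hy
          have := List.mem_takeWhile_imp hy
          simpa [hp] using this
        have hdlen : ((x :: xs).dropWhile p).length ≤ n := by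
          have h1 : ((x :: xs).dropWhile p).length < (x :: xs).length := by
            simp only [List.dropWhile, hp]
            simp [hx]
            exact List.length_dropWhile_le _ _
          have h2 : (x :: xs).length ≤ n + 1 := hlen
          simp only [List.length_cons] at h1 h2
          omega
        rw [ih _ hdlen]
        conv_rhs => rw [← hsplit]
        rw [pvZeros _ _ hall]
      · -- truthy run
        rw [streak_counter_alt, if_pos hx]
        set p : Int → Bool := fun y => decide (y ≠ 0) with hp
        have hsplit : (x :: xs).takeWhile p ++ (x :: xs).dropWhile p = x :: xs :=
          List.takeWhile_append_dropWhile
        have hall : ∀ y ∈ (x :: xs).takeWhile p, y ≠ 0 := by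
          intro y hy
          have := List.mem_takeWhile_imp hy
          simpa [hp] using this
        have hdlen : ((x :: xs).dropWhile p).length ≤ n := by
          have h1 : ((x :: xs).dropWhile p).length < (x :: xs).length := by
            simp only [List.dropWhile, hp]
            simp [hx]
            exact List.length_dropWhile_le _ _
          have h2 : (x :: xs).length ≤ n + 1 := hlen
          simp only [List.length_cons] at h1 h2
          omega
        rw [ih _ hdlen]
        conv_rhs => rw [← hsplit]
        rw [pvRamp _ _ _ hall]
        simp only [Int.ofNat_eq_natCast]
        congr 1
        · apply List.map_congr_left; intro i _; ring
        · rcases pvDrop_shape p (x :: xs) with h | ⟨y, t, ht, hy⟩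
          · simp [h, pvSpecGo]
          · have hy0 : y = 0 := by simpa [hp] using hy
            rw [ht]
            exact (pvReset (y :: t) _ (Or.inr ⟨t, by rw [hy0]⟩)).symm

-- ===== VERDICT (by name: the statement is the Claim_ definition above) =====
theorem streak_counter_spec : Claim_equal_streak_counter := by
  intro arr _
  unfold Spec_streak_counter streak_counter
  rw [pvA_go arr 0 [], pvAlt_eq_go arr.length arr le_rfl]
  simp
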